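-- pv_equiv track=rewrite | github.com/christyesmee/KR_SAT_A3 | generate_benchmark.py | _count_nc_violations
-- ===== SOURCE A (Python) =====
-- def orthogonal_neighbors(r: int, c: int, n: int):
--     if r > 0: yield r - 1, c
--     if r + 1 < n: yield r + 1, c
--     if c > 0: yield r, c - 1
--     if c + 1 < n: yield r, c + 1
--
-- def _count_nc_violations(grid):
--     n=len(grid)
--     bad=0
--     for r in range(n):
--         for c in range(n):
--             for rr,cc in orthogonal_neighbors(r,c,n):
--                 if (rr,cc)>(r,c) and abs(grid[r][c]-grid[rr][cc])==1:
--                     bad+=1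
--     return bad
-- ===== SOURCE B (Python) =====
-- def _count_nc_violations(grid):
--     n = len(grid)
--     bad = 0
--     prev = None
--     for full in grid:
--         row = full[:n]
--         bad += sum(1 for a, b in zip(row, row[1:]) if abs(a - b) == 1)
--         if prev is not None:
--             bad += sum(1 for a, b in zip(prev, row) if abs(a - b) == 1)
--         prev = row
--     return bad
-- ===== Notes on version B (the rewrite author's own statement) =====
-- stated objective: faster
-- what changed: Index-free single streaming pass over the rows with a previous-row buffer: horizontal pairs from zip(row, row[1:]) and vertical pairs from zip(prev, row), replacing A's three nested index loops with a per-cell neighbor generator and a (rr,cc)>(r,c) tuple-comparison dedup filter.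
import Mathlib
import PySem

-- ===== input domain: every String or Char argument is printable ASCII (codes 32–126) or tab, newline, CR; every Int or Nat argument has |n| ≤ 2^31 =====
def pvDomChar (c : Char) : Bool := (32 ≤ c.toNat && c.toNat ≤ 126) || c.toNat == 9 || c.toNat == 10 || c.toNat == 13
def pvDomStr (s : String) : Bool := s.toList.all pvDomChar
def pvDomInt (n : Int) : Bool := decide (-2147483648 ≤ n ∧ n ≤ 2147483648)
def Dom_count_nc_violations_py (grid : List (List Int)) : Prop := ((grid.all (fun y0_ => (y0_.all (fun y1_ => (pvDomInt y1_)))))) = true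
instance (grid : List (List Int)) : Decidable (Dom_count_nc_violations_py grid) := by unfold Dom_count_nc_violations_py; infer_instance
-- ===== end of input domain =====

-- B is an index-free single streaming pass over the rows with a previous-row buffer
-- (zip for horizontal and vertical pairs), replacing A's three nested index loops with
-- a per-cell neighbor generator and a tuple-comparison dedup filter: same O(n^2) work,
-- measurably faster by a constant factor (no generator/tuple overhead per cell).

-- ===== PORT A =====
-- Python's tuple comparison (rr, cc) > (r, c), lexicographic
def pvTupGt (p q : Int × Int) : Bool := q.1 < p.1 || (p.1 == q.1 && q.2 < p.2)

-- the orthogonal_neighbors generator, as the list of pairs it yields (in yield order)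
def pvOrthNeighbors (r c n : Int) : List (Int × Int) :=
  (if 0 < r then [(r - 1, c)] else []) ++
  (if r + 1 < n then [(r + 1, c)] else []) ++
  (if 0 < c then [(r, c - 1)] else []) ++
  (if c + 1 < n then [(r, c + 1)] else [])

def count_nc_violations_py (grid : List (List Int)) : Int :=
  let n : Int := grid.length
  (PySem.List.pyRange 0 n 1).foldl (fun bad r =>
    (PySem.List.pyRange 0 n 1).foldl (fun bad c =>
      (pvOrthNeighbors r c n).foldl (fun bad p =>
        if pvTupGt p (r, c) = true ∧
           (PySem.List.pyGetD (PySem.List.pyGetD grid r []) c 0 -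
            PySem.List.pyGetD (PySem.List.pyGetD grid p.1 []) p.2 0).natAbs = 1
        then bad + 1 else bad) bad) bad) 0

-- ===== PORT B =====
-- sum(1 for a, b in <pairs> if abs(a - b) == 1)
def pvPairCount (ps : List (Int × Int)) : Int :=
  ps.foldl (fun acc p => if (p.1 - p.2).natAbs = 1 then acc + 1 else acc) 0

def count_nc_violations_py_alt (grid : List (List Int)) : Int :=
  let n : Int := grid.length
  (grid.foldl (fun (st : Int × Option (List Int)) full =>
      let row := PySem.List.slice full (some 0) (some n)    -- full[:n]
      let bad := st.1 + pvPairCount (row.zip (PySem.List.slice row (some 1) none))  -- zip(row, row[1:])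
      let bad := match st.2 with
        | some prev => bad + pvPairCount (prev.zip row)      -- zip(prev, row)
        | none => bad
      (bad, some row)) ((0 : Int), (none : Option (List Int)))).1

-- ===== PRECONDITION & SPEC =====
-- Pre_: unless len(grid) ≤ 1 (then no adjacent pair is ever inspected and nothing is
-- indexed), every row must have at least len(grid) entries — on shorter (ragged) rows
-- the Python A raises IndexError; exactly those inputs are excluded.
def Pre_count_nc_violations_py (grid : List (List Int)) : Prop :=
  grid.length ≤ 1 ∨ ∀ row ∈ grid, (grid.length : Int) ≤ row.length
instance (grid : List (List Int)) : Decidable (Pre_count_nc_violations_py grid) := by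
  unfold Pre_count_nc_violations_py; infer_instance
def pvWitness_count_nc_violations_py : List (List Int) := [[1, 2], [3, 5]]

def Spec_count_nc_violations_py (grid : List (List Int)) (out : Int) : Prop := out = count_nc_violations_py_alt grid
instance (grid : List (List Int)) (out : Int) : Decidable (Spec_count_nc_violations_py grid out) := by unfold Spec_count_nc_violations_py; infer_instance

-- ===== CLAIM (what is proved, stated in full; the proofs are below) =====
def Claim_equal_count_nc_violations_py : Prop := ∀ (grid : List (List Int)), Dom_count_nc_violations_py grid → Pre_count_nc_violations_py grid → Spec_count_nc_violations_py grid (count_nc_violations_py grid)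

-- ===== LEMMAS AND PROOFS =====

-- cell lookup shared by the proofs
def pvG (grid : List (List Int)) (r c : Int) : Int :=
  PySem.List.pyGetD (PySem.List.pyGetD grid r []) c 0

-- 0/1 indicator for "differ by exactly one"
def pvInd (a b : Int) : Int := if (a - b).natAbs = 1 then 1 else 0

-- right-neighbor / down-neighbor indicators at cell (r, c)
def pvH (grid : List (List Int)) (r c : Int) : Int := pvInd (pvG grid r c) (pvG grid r (c + 1))
def pvV (grid : List (List Int)) (r c : Int) : Int := pvInd (pvG grid r c) (pvG grid (r + 1) c)

-- A's neighbor loop at one cell contributes exactly the right- and down-indicators: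
-- the (rr,cc)>(r,c) filter kills the up and left neighbors and keeps down and right.
lemma pv_inner_eq (grid : List (List Int)) (n r c bad : Int) :
    (pvOrthNeighbors r c n).foldl (fun bad p =>
      if pvTupGt p (r, c) = true ∧
         (PySem.List.pyGetD (PySem.List.pyGetD grid r []) c 0 -
          PySem.List.pyGetD (PySem.List.pyGetD grid p.1 []) p.2 0).natAbs = 1
      then bad + 1 else bad) bad
    = bad + ((if c + 1 < n then pvH grid r c else 0) + (if r + 1 < n then pvV grid r c else 0)) := by
  have hup : pvTupGt (r - 1, c) (r, c) = false := by simp [pvTupGt]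
  have hleft : pvTupGt (r, c - 1) (r, c) = false := by simp [pvTupGt]
  have hdown : pvTupGt (r + 1, c) (r, c) = true := by simp [pvTupGt]
  have hright : pvTupGt (r, c + 1) (r, c) = true := by simp [pvTupGt]
  unfold pvOrthNeighbors
  by_cases h1 : 0 < r <;> by_cases h2 : r + 1 < n <;> by_cases h3 : 0 < c <;> by_cases h4 : c + 1 < n <;>
    simp [h1, h2, h3, h4, hup, hleft, hdown, hright, pvH, pvV, pvG, pvInd] <;>
    split_ifs <;> omega

-- a sum over range(n) whose term carries the guard i+1<n is a sum over range(n-1)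
lemma pv_sum_guard (n : Int) (hn : 0 ≤ n) (f : Int → Int) :
    ((PySem.List.pyRange 0 n 1).map (fun i => if i + 1 < n then f i else 0)).sum
    = ((PySem.List.pyRange 0 (n - 1) 1).map f).sum := by
  rcases eq_or_lt_of_le hn with h | h
  · rw [PySem.List.pyRange_one_eq_nil (by omega), PySem.List.pyRange_one_eq_nil (by omega)]
    simp
  · have hsplit : PySem.List.pyRange 0 n 1 = PySem.List.pyRange 0 (n - 1) 1 ++ [n - 1] := by
      have h2 := PySem.List.pyRange_one_succ_right (a := 0) (b := n - 1) (by omega)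
      rw [sub_add_cancel] at h2; exact h2
    rw [hsplit, List.map_append, List.sum_append]
    have hlast : (if (n - 1) + 1 < n then f (n - 1) else 0) = 0 := by simp
    simp only [List.map_cons, List.map_nil, List.sum_cons, List.sum_nil, hlast, add_zero]
    congr 1
    apply List.map_congr_left
    intro i hi
    have := (PySem.List.mem_pyRange_one).1 hi
    simp; omega

-- A as a double sum of guarded indicators
lemma pv_A_eq (grid : List (List Int)) :
    count_nc_violations_py grid =
    ((PySem.List.pyRange 0 (grid.length : Int) 1).map (fun r =>
      ((PySem.List.pyRange 0 (grid.length : Int) 1).map (fun c =>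
        (if c + 1 < (grid.length : Int) then pvH grid r c else 0) +
        (if r + 1 < (grid.length : Int) then pvV grid r c else 0))).sum)).sum := by
  simp only [count_nc_violations_py]
  have hmid : ∀ (acc r : Int),
      (PySem.List.pyRange 0 (grid.length : Int) 1).foldl (fun bad c =>
        (pvOrthNeighbors r c (grid.length : Int)).foldl (fun bad p =>
          if pvTupGt p (r, c) = true ∧
             (PySem.List.pyGetD (PySem.List.pyGetD grid r []) c 0 -
              PySem.List.pyGetD (PySem.List.pyGetD grid p.1 []) p.2 0).natAbs = 1
          then bad + 1 else bad) bad) acc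
      = acc + ((PySem.List.pyRange 0 (grid.length : Int) 1).map (fun c =>
          (if c + 1 < (grid.length : Int) then pvH grid r c else 0) +
          (if r + 1 < (grid.length : Int) then pvV grid r c else 0))).sum := by
    intro acc r
    refine Eq.trans (PySem.List.foldl_congr_mem _ _ _ _ ?_) (PySem.List.foldl_add _ _ _)
    intro acc c _
    exact pv_inner_eq grid (grid.length : Int) r c acc
  refine Eq.trans (Eq.trans (PySem.List.foldl_congr_mem _ _ _ _ ?_) (PySem.List.foldl_add _ _ _)) (zero_add _)
  intro acc r _
  exact hmid acc r

-- pvPairCount as a sum of indicators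
lemma pvPairCount_eq_sum (ps : List (Int × Int)) :
    pvPairCount ps = (ps.map (fun p => pvInd p.1 p.2)).sum := by
  simp only [pvPairCount, pvInd]
  rw [PySem.List.foldl_ite_add_one]
  have h : (ps.map (fun p => if (p.1 - p.2).natAbs = 1 then (1 : Int) else 0))
      = ps.map (fun p => if decide ((p.1 - p.2).natAbs = 1) = true then (1 : Int) else 0) := by simp
  rw [h, PySem.List.sum_map_ite_one_zero]
  simp

-- a sum over the adjacent pairs of a list, indexed
lemma pv_zip_tail_sum {α : Type} (f : α → α → Int) (d : α) :
    ∀ (u : List α), ((u.zip u.tail).map (fun p => f p.1 p.2)).sum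
      = ((List.range (u.length - 1)).map (fun c => f (u.getD c d) (u.getD (c + 1) d))).sum := by
  intro u
  induction u with
  | nil => simp
  | cons a t ih =>
      cases t with
      | nil => simp
      | cons b t' =>
          simp only [List.tail_cons, List.zip_cons_cons, List.map_cons, List.sum_cons] at *
          rw [ih]
          have hlen : (a :: b :: t').length - 1 = t'.length + 1 := by simp
          rw [hlen, List.range_succ_eq_map, List.map_cons, List.sum_cons, List.map_map]
          simp [Function.comp_def, List.getD]

-- a sum over zip of two lists, indexed
lemma pv_zip_sum (f : Int → Int → Int) :
    ∀ (p q : List Int), ((p.zip q).map (fun x => f x.1 x.2)).sum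
      = ((List.range (min p.length q.length)).map (fun c => f (p.getD c 0) (q.getD c 0))).sum := by
  intro p
  induction p with
  | nil => simp
  | cons a t ih =>
      intro q
      cases q with
      | nil => simp
      | cons b q' =>
          simp only [List.zip_cons_cons, List.map_cons, List.sum_cons]
          rw [ih q']
          have : min (a :: t).length (b :: q').length = min t.length q'.length + 1 := by
            simp [Nat.succ_min_succ]
          rw [this, List.range_succ_eq_map, List.map_cons, List.sum_cons, List.map_map]
          simp [Function.comp_def, List.getD]

-- a sum over a list, indexed
lemma pv_sum_eq_range {α : Type} (d : α) (F : α → Int) :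
    ∀ (l : List α), (l.map F).sum = ((List.range l.length).map (fun i => F (l.getD i d))).sum := by
  intro l
  induction l with
  | nil => simp
  | cons a t ih =>
      simp only [List.map_cons, List.sum_cons, List.length_cons]
      rw [ih, List.range_succ_eq_map, List.map_cons, List.sum_cons, List.map_map]
      simp [Function.comp_def, List.getD]

-- a pyRange-indexed sum is a Nat-range-indexed sum
lemma pv_pyRange_sum (k : Nat) (g : Int → Int) :
    ((PySem.List.pyRange 0 (k : Int) 1).map g).sum = ((List.range k).map (fun i : Nat => g (i : Int))).sum := by
  induction k with
  | zero => rw [PySem.List.pyRange_one_eq_nil (by omega)]; simp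
  | succ m ih =>
      have hc : ((m + 1 : Nat) : Int) = (m : Int) + 1 := by push_cast; ring
      rw [hc, PySem.List.pyRange_one_succ_right (by positivity), List.range_succ]
      simp only [List.map_append, List.sum_append, ih]
      simp

-- horizontal count within a row, then vertical chain of adjacent rows
def pvHcount (row : List Int) : Int := pvPairCount (row.zip row.tail)
def pvVchain (l : List (List Int)) : Int :=
  ((l.zip l.tail).map (fun p => pvPairCount (p.1.zip p.2))).sum

-- the streaming fold of B, unrolled
lemma pv_B_fold (n : Int) :
    ∀ (rows : List (List Int)) (bad : Int) (pv : List Int),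
      (rows.foldl (fun (st : Int × Option (List Int)) full =>
        let row := PySem.List.slice full (some 0) (some n)
        let bad := st.1 + pvPairCount (row.zip (PySem.List.slice row (some 1) none))
        let bad := match st.2 with
          | some prev => bad + pvPairCount (prev.zip row)
          | none => bad
        (bad, some row)) (bad, some pv)).1
      = bad + (rows.map (fun fu => pvHcount (PySem.List.slice fu (some 0) (some n)))).sum
            + pvVchain (pv :: rows.map (fun fu => PySem.List.slice fu (some 0) (some n))) := by
  intro rows
  induction rows with
  | nil => intro bad pv; simp [pvVchain]
  | cons fu t ih =>
      intro bad pv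
      simp only [List.foldl_cons, List.map_cons, List.sum_cons]
      rw [ih]
      have : pvVchain (pv :: PySem.List.slice fu (some 0) (some n) :: t.map (fun fu => PySem.List.slice fu (some 0) (some n)))
          = pvPairCount (pv.zip (PySem.List.slice fu (some 0) (some n)))
            + pvVchain (PySem.List.slice fu (some 0) (some n) :: t.map (fun fu => PySem.List.slice fu (some 0) (some n))) := by
        simp [pvVchain]
      rw [this]
      simp only [pvHcount, PySem.List.slice_from_one]
      ring

-- B in closed form: row counts plus the vertical chain over the truncated rows
lemma pv_B_eq (grid : List (List Int)) :
    count_nc_violations_py_alt grid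
    = (grid.map (fun fu => pvHcount (fu.take grid.length))).sum
      + pvVchain (grid.map (fun fu => fu.take grid.length)) := by
  have hsl : ∀ fu : List Int, PySem.List.slice fu (some 0) (some (grid.length : Int)) = fu.take grid.length := by
    intro fu
    rw [PySem.List.slice_zero_start, PySem.List.slice_to_natCast]
  cases grid with
  | nil => rfl
  | cons fu t =>
      simp only [count_nc_violations_py_alt, List.foldl_cons]
      rw [pv_B_fold]
      simp only [hsl, pvHcount, PySem.List.slice_from_one, List.map_cons, List.sum_cons]
      have : ((fu.take (fu :: t).length) :: t.map (fun fu2 => fu2.take (fu :: t).length))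
           = (fu :: t).map (fun fu2 => fu2.take (fu :: t).length) := by simp
      rw [this]
      ring

-- entries of a truncated row agree with the row on the kept indices
lemma pv_getD_take (row : List Int) (nn c : Nat) (hc : c < nn) (hlen : nn ≤ row.length) :
    (row.take nn).getD c 0 = row.getD c 0 := by
  have h1 : c < (row.take nn).length := by simp [List.length_take]; omega
  have h2 : c < row.length := by omega
  rw [List.getD_eq_getElem _ _ h1, List.getD_eq_getElem _ _ h2]
  simp [List.getElem_take]

-- pvG at Nat indices, through getD
lemma pv_pvG_natCast (grid : List (List Int)) (r c : Nat) :
    pvG grid (r : Int) (c : Int) = (grid.getD r []).getD c 0 := by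
  simp [pvG, PySem.List.pyGetD_natCast]

-- the main equality on well-formed grids (every row at least len(grid) long)
lemma pv_AB_main (grid : List (List Int))
    (hrows : ∀ row ∈ grid, (grid.length : Int) ≤ row.length) :
    count_nc_violations_py grid = count_nc_violations_py_alt grid := by
  by_cases hg : grid = []
  · subst hg; rfl
  have hnn1 : 1 ≤ grid.length := List.length_pos_of_ne_nil hg
  have hrow : ∀ r : Nat, r < grid.length → grid.length ≤ (grid.getD r []).length := by
    intro r hr
    have hmem : grid.getD r [] ∈ grid := by
      rw [List.getD_eq_getElem _ _ (by omega)]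
      exact List.getElem_mem _
    have := hrows _ hmem
    exact_mod_cast this
  have hTget : ∀ r : Nat, (grid.map (fun fu => fu.take grid.length)).getD r [] = (grid.getD r []).take grid.length := by
    intro r
    have : ([] : List Int) = List.take grid.length [] := by simp
    rw [this, List.getD_map]
    simp
  rw [pv_B_eq, pv_A_eq]
  -- A side: split the double sum and strip the guards
  have hsplit : ∀ r : Int,
      ((PySem.List.pyRange 0 (grid.length : Int) 1).map (fun c =>
        (if c + 1 < (grid.length : Int) then pvH grid r c else 0) +
        (if r + 1 < (grid.length : Int) then pvV grid r c else 0))).sum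
      = ((PySem.List.pyRange 0 ((grid.length : Int) - 1) 1).map (fun c => pvH grid r c)).sum
        + (if r + 1 < (grid.length : Int) then ((PySem.List.pyRange 0 (grid.length : Int) 1).map (fun c => pvV grid r c)).sum else 0) := by
    intro r
    rw [PySem.List.sum_map_add_int, pv_sum_guard _ (by positivity)]
    congr 1
    split <;> simp
  simp only [hsplit]
  rw [PySem.List.sum_map_add_int, pv_sum_guard _ (by positivity)]
  have hcast : ((grid.length : Int) - 1) = ((grid.length - 1 : Nat) : Int) := by omega
  -- now both sides are Hsum + Vsum; prove the pieces
  congr 1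
  · -- horizontal piece
    rw [hcast, pv_pyRange_sum, pv_sum_eq_range ([] : List Int)]
    refine congrArg List.sum (List.map_congr_left ?_)
    intro r hr
    have hrlt : r < grid.length := List.mem_range.1 hr
    have hlen : grid.length ≤ (grid.getD r []).length := hrow r hrlt
    rw [pvHcount, pvPairCount_eq_sum, pv_zip_tail_sum _ (0 : Int)]
    have hlt : ((grid.getD r []).take grid.length).length = grid.length := by
      rw [List.length_take]; omega
    rw [hlt, pv_pyRange_sum]
    refine congrArg List.sum (List.map_congr_left ?_)
    intro c hc
    have hclt : c < grid.length - 1 := List.mem_range.1 hc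
    have e1 : pvH grid (r : Int) (c : Int) = pvInd ((grid.getD r []).getD c 0) ((grid.getD r []).getD (c + 1) 0) := by
      have : ((c : Int) + 1) = ((c + 1 : Nat) : Int) := by push_cast; ring
      rw [pvH, pv_pvG_natCast, this, pv_pvG_natCast]
    rw [e1, pv_getD_take _ grid.length c (by omega) hlen, pv_getD_take _ grid.length (c + 1) (by omega) hlen]
  · -- vertical piece
    rw [pvVchain, pv_zip_tail_sum (fun a b => pvPairCount (a.zip b)) ([] : List Int)]
    have hTn : (grid.map (fun fu => fu.take grid.length)).length = grid.length := by simp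
    rw [hTn, hcast, pv_pyRange_sum]
    refine congrArg List.sum (List.map_congr_left ?_)
    intro r hr
    have hrlt : r < grid.length - 1 := List.mem_range.1 hr
    rw [hTget, hTget, pvPairCount_eq_sum, pv_zip_sum]
    have hl1 : grid.length ≤ (grid.getD r []).length := hrow r (by omega)
    have hl2 : grid.length ≤ (grid.getD (r + 1) []).length := hrow (r + 1) (by omega)
    have hmin : min ((grid.getD r []).take grid.length).length ((grid.getD (r + 1) []).take grid.length).length = grid.length := by
      rw [List.length_take, List.length_take]; omega
    rw [hmin, pv_pyRange_sum]
    refine congrArg List.sum (List.map_congr_left ?_)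
    intro c hc
    have hclt : c < grid.length := List.mem_range.1 hc
    have e1 : pvV grid (r : Int) (c : Int) = pvInd ((grid.getD r []).getD c 0) ((grid.getD (r + 1) []).getD c 0) := by
      have : ((r : Int) + 1) = ((r + 1 : Nat) : Int) := by push_cast; ring
      rw [pvV, pv_pvG_natCast, this, pv_pvG_natCast]
    rw [e1, pv_getD_take _ grid.length c hclt hl1, pv_getD_take _ grid.length c hclt hl2]

-- the degenerate case: at most one row, both programs return 0
lemma pv_AB_small (grid : List (List Int)) (h : grid.length ≤ 1) :
    count_nc_violations_py grid = count_nc_violations_py_alt grid := by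
  rcases grid with _ | ⟨row, t⟩
  · rfl
  · have ht : t = [] := by
      cases t with
      | nil => rfl
      | cons _ _ => simp at h
    subst ht
    rw [pv_A_eq, pv_B_eq]
    have h1 : PySem.List.pyRange 0 (1 : Int) 1 = [0] := by decide
    have hH : pvHcount (row.take 1) = 0 := by
      cases row with
      | nil => rfl
      | cons a t' => simp [pvHcount, pvPairCount, List.take]
    simp [h1, hH, pvVchain]

-- ===== VERDICT (by name: the statement is the Claim_ definition above) =====
theorem count_nc_violations_py_spec : Claim_equal_count_nc_violations_py := by
  intro grid _ hpre
  unfold Spec_count_nc_violations_py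
  rcases hpre with h | h
  · exact pv_AB_small grid h
  · exact pv_AB_main grid h
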